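-- pv_equiv track=rewrite | github.com/bug400/pyilper | pyilper/lifcore.py | getLifString
-- ===== SOURCE A (Python) =====
-- def getLifString(data,offset,length):
--    str_list= []
--    j= -1
--    for i in range(length):
--       if data[offset+i] != 0x20:
--          j=i
--    if j == -1:
--       return ""
--    else:
--       for i in range(j+1):
--          str_list.append(chr(data[offset+i]))
--       return "".join(str_list)
-- ===== SOURCE B (Python) =====
-- def getLifString(data, offset, length):
--     return "".join(chr(data[offset + i]) for i in range(length)).rstrip(' ')
-- ===== Notes on version B (the rewrite author's own statement) =====
-- stated objective: simpler
-- what changed: Replaces A's two-phase find-last-non-space-index-then-rebuild structure (with an explicit j == -1 all-spaces guard) by a single build of the whole decoded string followed by rstrip(' ').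
import Mathlib
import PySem

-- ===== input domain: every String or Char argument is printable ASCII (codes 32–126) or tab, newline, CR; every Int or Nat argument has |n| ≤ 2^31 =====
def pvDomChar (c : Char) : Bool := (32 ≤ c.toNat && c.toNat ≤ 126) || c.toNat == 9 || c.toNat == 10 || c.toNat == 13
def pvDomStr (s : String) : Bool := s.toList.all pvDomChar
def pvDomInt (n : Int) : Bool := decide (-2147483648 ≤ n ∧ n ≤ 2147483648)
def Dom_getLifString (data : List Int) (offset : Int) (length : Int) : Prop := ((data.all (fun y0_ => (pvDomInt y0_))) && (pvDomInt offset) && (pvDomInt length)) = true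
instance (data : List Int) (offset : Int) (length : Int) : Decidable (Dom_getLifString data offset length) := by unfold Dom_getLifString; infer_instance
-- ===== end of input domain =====

-- B builds the whole decoded string and trims trailing spaces with rstrip(' '),
-- replacing A's find-last-non-space-index-then-rebuild two-phase structure (simpler).


-- ===== PORT A =====
-- Literal port of A: first loop tracks j, the last index whose byte is not 0x20;
-- if j stayed -1 return "", else rebuild the first j+1 characters with chr.
-- data[offset+i] is PySem.List.pyGet?; the none (IndexError) case and invalid chr
-- arguments are excluded by Pre_, so the port uses getD 32 / Char.ofNat there.
def getLifString (data : List Int) (offset : Int) (length : Int) : String :=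
  let j : Int := (List.range length.toNat).foldl
    (fun (j : Int) (i : Nat) => if ((PySem.List.pyGet? data (offset + (i : Int))).getD 32) ≠ 0x20 then (i : Int) else j)
    (-1)
  if j = -1 then ""
  else String.mk ((List.range (j + 1).toNat).map
    (fun (i : Nat) => Char.ofNat ((PySem.List.pyGet? data (offset + (i : Int))).getD 32).toNat))

-- ===== PORT B =====
-- Port of B: build the full decoded char list, then rstrip(' ') ported by hand as
-- "drop trailing spaces" (exact for rstrip with the single-space argument: only 0x20 is removed).
def getLifString_alt (data : List Int) (offset : Int) (length : Int) : String :=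
  let s : List Char := (List.range length.toNat).map
    (fun (i : Nat) => Char.ofNat ((PySem.List.pyGet? data (offset + (i : Int))).getD 32).toNat)
  String.mk ((s.reverse.dropWhile (· == ' ')).reverse)

-- ===== PRECONDITION & SPEC =====
-- Pre_ excludes inputs where some accessed index is out of range (A raises IndexError)
-- or some accessed value is outside chr's representable range (A raises ValueError/OverflowError),
-- and the surrogate code points 0xD800-0xDFFF, on which A returns a lone-surrogate str
-- that no Lean String can represent.  The 'min … (2 * data.length)' cap only makes the
-- condition checkable in O(|data|): under the index-bounds conjunct length ≤ 2*data.length,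
-- so it never excludes anything further.
def Pre_getLifString (data : List Int) (offset : Int) (length : Int) : Prop :=
  (0 < length → -(data.length : Int) ≤ offset ∧ offset + length ≤ (data.length : Int)) ∧
  ∀ i ∈ List.range (min length.toNat (2 * data.length)),
    0 ≤ (PySem.List.pyGet? data (offset + (i : Int))).getD (-1) ∧
    ((PySem.List.pyGet? data (offset + (i : Int))).getD (-1) < 55296 ∨
     (57344 ≤ (PySem.List.pyGet? data (offset + (i : Int))).getD (-1) ∧
      (PySem.List.pyGet? data (offset + (i : Int))).getD (-1) < 1114112))
instance (data : List Int) (offset : Int) (length : Int) : Decidable (Pre_getLifString data offset length) := by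
  unfold Pre_getLifString; infer_instance

def pvWitness_getLifString : List Int × Int × Int := ([72, 73, 32, 32], 0, 4)

def Spec_getLifString (data : List Int) (offset : Int) (length : Int) (out : String) : Prop := out = getLifString_alt data offset length
instance (data : List Int) (offset : Int) (length : Int) (out : String) : Decidable (Spec_getLifString data offset length out) := by unfold Spec_getLifString; infer_instance

-- ===== CLAIM (what is proved, stated in full; the proofs are below) =====
def Claim_equal_getLifString : Prop := ∀ (data : List Int) (offset : Int) (length : Int), Dom_getLifString data offset length → Pre_getLifString data offset length → Spec_getLifString data offset length (getLifString data offset length)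

-- ===== LEMMAS AND PROOFS =====

-- Generic core: finding the last non-space index and taking that prefix (A's shape)
-- equals building everything and dropping trailing spaces (B's shape).
theorem build_trim (g : Nat → Char) : ∀ n : Nat,
    (if (List.range n).foldl (fun j i => if g i ≠ ' ' then (i : Int) else j) (-1) = -1 then ""
     else String.mk ((List.range ((List.range n).foldl (fun j i => if g i ≠ ' ' then (i : Int) else j) (-1) + 1).toNat).map g))
    = String.mk (((((List.range n).map g)).reverse.dropWhile (· == ' ')).reverse) := by
  intro n
  induction n with
  | zero => simp; rfl
  | succ n ih =>
    rw [List.range_succ, List.foldl_append, List.map_append]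
    by_cases h : g n = ' '
    · simpa [h] using ih
    · have hne : ((n : Int)) ≠ -1 := by omega
      have ht : ((n : Int) + 1).toNat = n + 1 := by omega
      simp only [List.foldl_cons, List.foldl_nil, if_pos h, if_neg hne, ht]
      simp [List.reverse_append, h, List.range_succ]

theorem getLifString_core (data : List Int) (offset : Int) (length : Int)
    (hpre : Pre_getLifString data offset length) :
    getLifString data offset length = getLifString_alt data offset length := by
  unfold getLifString getLifString_alt
  set g : Nat → Char := fun i => Char.ofNat ((PySem.List.pyGet? data (offset + (i : Int))).getD 32).toNat with hg
  have hcong : (List.range length.toNat).foldl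
      (fun (j : Int) (i : Nat) => if ((PySem.List.pyGet? data (offset + (i : Int))).getD 32) ≠ 0x20 then (i : Int) else j) (-1)
    = (List.range length.toNat).foldl (fun j i => if g i ≠ ' ' then (i : Int) else j) (-1) := by
    apply PySem.List.foldl_congr_mem
    intro acc i hi
    have hi' : i ∈ List.range (min length.toNat (2 * data.length)) := by
      rw [List.mem_range] at hi ⊢
      have h1 : 0 < length := by omega
      rcases hpre.1 h1 with ⟨hb1, hb2⟩
      omega
    rcases hpre.2 i hi' with ⟨h0, hv⟩
    rcases hsome : PySem.List.pyGet? data (offset + (i : Int)) with _ | c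
    · rw [hsome] at h0; simp at h0
    · rw [hsome] at h0 hv
      simp only [Option.getD_some] at h0 hv
      have hvalid : c.toNat.isValidChar := by
        rcases hv with h | ⟨h1, h2⟩
        · exact Or.inl (by omega)
        · exact Or.inr ⟨by omega, by omega⟩
      have hval : (Char.ofNat c.toNat).toNat = c.toNat := by
        simp [Char.ofNat, hvalid, Char.ofNatAux, Char.toNat]
      have hgi : g i = Char.ofNat c.toNat := by rw [hg]; simp [hsome]
      have hiff : (c ≠ 32) ↔ (g i ≠ ' ') := by
        apply not_congr
        constructor
        · intro hc; subst hc; rw [hgi]; decide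
        · intro he
          rw [hgi] at he
          have h32 : (Char.ofNat c.toNat).toNat = 32 := by rw [he]; rfl
          rw [hval] at h32; omega
      simp only [Option.getD_some]
      exact if_congr hiff rfl rfl
  simp only [hcong]
  exact build_trim g length.toNat

-- ===== VERDICT (by name: the statement is the Claim_ definition above) =====
theorem getLifString_spec : Claim_equal_getLifString := by
  intro data offset length _ hpre
  unfold Spec_getLifString
  exact getLifString_core data offset length hpre
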